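-- pv_equiv track=rewrite | github.com/zhangzhangningning/zorder | GetZorder/NewInterleaveBits.py | interleave2
-- ===== SOURCE A (Python) =====
-- from math import ceil
--
-- def part1by1(n):
--     """
--     Inserts one 0 bit between each bit in `n`.
--
--     n: 16-bit integer
--     """
--     n &= 65535
--     n = (n | n << 8) & 16711935
--     n = (n | n << 4) & 252645135
--     n = (n | n << 2) & 858993459
--     n = (n | n << 1) & 1431655765
--     return n
--
-- def interleave2(x, y):
--     """
--     Interleaves two numbers in binary representation.
--
--     Uses a method of spacing out the numbers, filling with intermediate zeros,
--     then slightly shifting them and combining.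
--
--     x, y: 16-bit integers
--     """
--     max_bits = max(x.bit_length(), y.bit_length())
--     iterations = int(ceil(max_bits / 16))
--     n = 0
--     for i in range(iterations):
--         interleaved = part1by1(x & 65535) | part1by1(y & 65535) << 1
--         n |= interleaved << 32 * i
--         x = x >> 16
--         y = y >> 16
--
--     return n
-- ===== SOURCE B (Python) =====
-- from math import ceil
--
-- def interleave2(x, y):
--     """
--     Interleaves two numbers in binary representation (Morton code).
--
--     Places each bit directly at its target position instead of the
--     mask-spreading trick.
--     """
--     iterations = int(ceil(max(x.bit_length(), y.bit_length()) / 16))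
--     n = 0
--     for i in range(16 * iterations):
--         n |= ((x >> i) & 1) << (2 * i)
--         n |= ((y >> i) & 1) << (2 * i + 1)
--     return n
-- ===== Notes on version B (the rewrite author's own statement) =====
-- stated objective: simpler
-- what changed: Replaces the part1by1 mask-spreading helper and per-chunk OR-combining with a single plain loop that places each of the 16*iterations bits of x and y directly at its interleaved position.
import Mathlib
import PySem

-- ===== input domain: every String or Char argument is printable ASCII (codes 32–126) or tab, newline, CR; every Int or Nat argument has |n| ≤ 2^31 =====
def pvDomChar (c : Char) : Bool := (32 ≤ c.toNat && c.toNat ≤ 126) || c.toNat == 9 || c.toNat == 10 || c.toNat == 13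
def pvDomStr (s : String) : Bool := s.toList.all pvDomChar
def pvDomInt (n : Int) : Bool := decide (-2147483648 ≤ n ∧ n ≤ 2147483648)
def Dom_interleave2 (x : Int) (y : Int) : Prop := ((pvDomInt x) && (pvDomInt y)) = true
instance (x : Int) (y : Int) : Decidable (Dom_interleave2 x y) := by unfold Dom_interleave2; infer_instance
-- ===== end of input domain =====

-- B replaces A's mask-spreading part1by1 helper by a single loop that places every bit
-- directly at its interleaved position; same value on all inputs (objective: simpler).

-- ===== PORT A =====
-- part1by1: inserts one 0 bit between each bit of n (16-bit input)
def part1by1 (n : Int) : Int :=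
  let n := PySem.Int.band n 65535
  let n := PySem.Int.band (PySem.Int.bor n (n <<< (8 : Nat))) 16711935
  let n := PySem.Int.band (PySem.Int.bor n (n <<< (4 : Nat))) 252645135
  let n := PySem.Int.band (PySem.Int.bor n (n <<< (2 : Nat))) 858993459
  PySem.Int.band (PySem.Int.bor n (n <<< (1 : Nat))) 1431655765

-- loop body of A's `for i in range(iterations)` over the state (n, x, y)
def stepA (s : Int × Int × Int) (i : Nat) : Int × Int × Int :=
  let interleaved := PySem.Int.bor (part1by1 (PySem.Int.band s.2.1 65535))
                       ((part1by1 (PySem.Int.band s.2.2 65535)) <<< (1 : Nat))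
  (PySem.Int.bor s.1 (interleaved <<< (32 * i)), s.2.1 >>> (16 : Nat), s.2.2 >>> (16 : Nat))

def interleave2 (x : Int) (y : Int) : Int :=
  let maxBits : Nat := max (PySem.Int.bitLength x) (PySem.Int.bitLength y)
  -- int(ceil(max_bits / 16)): exact, since max_bits/16 is a float division of a small Nat
  -- by a power of two (no rounding), so the result is the ceiling division (maxBits+15)/16
  let iterations : Nat := (maxBits + 15) / 16
  ((List.range iterations).foldl stepA (0, x, y)).1

-- ===== PORT B =====
-- loop body of B's `for i in range(16 * iterations)` (the two `n |= …` statements)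
def stepB (x : Int) (y : Int) (n : Int) (i : Nat) : Int :=
  PySem.Int.bor (PySem.Int.bor n ((PySem.Int.band (x >>> i) 1) <<< (2 * i)))
    ((PySem.Int.band (y >>> i) 1) <<< (2 * i + 1))

def interleave2_alt (x : Int) (y : Int) : Int :=
  let iterations : Nat := (max (PySem.Int.bitLength x) (PySem.Int.bitLength y) + 15) / 16
  (List.range (16 * iterations)).foldl (stepB x y) 0

-- ===== PRECONDITION & SPEC =====
def Spec_interleave2 (x : Int) (y : Int) (out : Int) : Prop := out = interleave2_alt x y
instance (x : Int) (y : Int) (out : Int) : Decidable (Spec_interleave2 x y out) := by unfold Spec_interleave2; infer_instance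

-- ===== CLAIM (what is proved, stated in full; the proofs are below) =====
def Claim_equal_interleave2 : Prop := ∀ (x : Int) (y : Int), Dom_interleave2 x y → Spec_interleave2 x y (interleave2 x y)

-- ===== LEMMAS AND PROOFS =====

-- ---- Nat-level machinery ----

-- p1n: part1by1 on Nat
def p1n (c : Nat) : Nat :=
  let n := c &&& 65535
  let n := (n ||| n <<< 8) &&& 16711935
  let n := (n ||| n <<< 4) &&& 252645135
  let n := (n ||| n <<< 2) &&& 858993459
  (n ||| n <<< 1) &&& 1431655765

def bigOr (l : List Nat) : Nat := l.foldl (· ||| ·) 0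

def sprTerm (c j : Nat) : Nat := ((c >>> j) &&& 1) <<< (2 * j)

-- bit-by-bit spreading of the low 16 bits of c
def spread16 (c : Nat) : Nat := bigOr ((List.range 16).map (sprTerm c))

theorem foldl_or_eq (s : Nat) (l : List Nat) : l.foldl (· ||| ·) s = s ||| bigOr l := by
  induction l generalizing s with
  | nil => simp [bigOr]
  | cons a t ih =>
    simp only [List.foldl_cons, bigOr, ih (s ||| a), ih (0 ||| a)]
    simp [Nat.or_assoc]

theorem bigOr_cons (a : Nat) (t : List Nat) : bigOr (a :: t) = a ||| bigOr t := by
  show List.foldl (· ||| ·) (0 ||| a) t = _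
  rw [foldl_or_eq, Nat.zero_or]

theorem bigOr_append (l₁ l₂ : List Nat) : bigOr (l₁ ++ l₂) = bigOr l₁ ||| bigOr l₂ := by
  simp only [bigOr, List.foldl_append]
  rw [foldl_or_eq]
  rfl

theorem bigOr_map_or {α : Type} (f g : α → Nat) (l : List α) :
    bigOr (l.map (fun x => f x ||| g x)) = bigOr (l.map f) ||| bigOr (l.map g) := by
  induction l with
  | nil => simp [bigOr]
  | cons a t ih =>
    rw [List.map_cons, List.map_cons, List.map_cons, bigOr_cons, bigOr_cons, bigOr_cons, ih]
    ac_rfl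

theorem bigOr_map_shl {α : Type} (f : α → Nat) (k : Nat) (l : List α) :
    bigOr (l.map (fun x => f x <<< k)) = (bigOr (l.map f)) <<< k := by
  induction l with
  | nil => simp [bigOr]
  | cons a t ih =>
    rw [List.map_cons, List.map_cons, bigOr_cons, bigOr_cons, ih, Nat.shiftLeft_or_distrib]

-- ---- OR-linearity of both spreadings ----

theorem p1n_lor (a b : Nat) : p1n (a ||| b) = p1n a ||| p1n b := by
  simp only [p1n, Nat.and_or_distrib_right, Nat.shiftLeft_or_distrib]
  ac_rfl

theorem sprTerm_lor (a b j : Nat) : sprTerm (a ||| b) j = sprTerm a j ||| sprTerm b j := by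
  simp only [sprTerm, Nat.shiftRight_or_distrib, Nat.and_or_distrib_right,
    Nat.shiftLeft_or_distrib]

theorem spread16_lor (a b : Nat) : spread16 (a ||| b) = spread16 a ||| spread16 b := by
  unfold spread16
  rw [show (List.range 16).map (sprTerm (a ||| b))
      = (List.range 16).map (fun j => sprTerm a j ||| sprTerm b j) from
    List.map_congr_left (fun j _ => sprTerm_lor a b j)]
  exact bigOr_map_or _ _ _

-- a ||| 2^k = a + 2^k for a below the bit
theorem lor_two_pow_of_lt (a k : Nat) (h : a < 2 ^ k) : a ||| 2 ^ k = a + 2 ^ k := by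
  apply Nat.eq_of_testBit_eq
  intro j
  rcases lt_trichotomy j k with hj | rfl | hj
  · rw [Nat.testBit_or, Nat.add_comm a (2 ^ k), Nat.testBit_two_pow_add_gt hj,
      Nat.testBit_two_pow]
    simp [Nat.ne_of_gt hj]
  · rw [Nat.testBit_or, Nat.add_comm a (2 ^ j), Nat.testBit_two_pow_add_eq,
      Nat.testBit_lt_two_pow h, Nat.testBit_two_pow]
    simp
  · have hle : 2 ^ (k + 1) ≤ 2 ^ j := Nat.pow_le_pow_right (by norm_num) hj
    have hlt : a + 2 ^ k < 2 ^ (k + 1) := by rw [Nat.pow_succ]; omega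
    have h1 : a.testBit j = false := Nat.testBit_lt_two_pow (by omega)
    have h2 : (a + 2 ^ k).testBit j = false := Nat.testBit_lt_two_pow (by omega)
    rw [Nat.testBit_or, h1, h2, Nat.testBit_two_pow]
    simp [Nat.ne_of_lt hj]

-- single placed bits agree
theorem single_bit_agree (k : Nat) (hk : k < 16) : p1n (2 ^ k) = spread16 (2 ^ k) := by
  interval_cases k <;> decide

-- p1n and spread16 agree below 2^16
theorem agree : ∀ k, k ≤ 16 → ∀ c, c < 2 ^ k → p1n c = spread16 c := by
  intro k
  induction k with
  | zero =>
    intro _ c hc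
    rw [pow_zero] at hc
    have h0 : c = 0 := by omega
    subst h0
    decide
  | succ k ih =>
    intro hk c hc
    rw [Nat.pow_succ] at hc
    have hpow : 0 < 2 ^ k := Nat.pow_pos (by norm_num)
    have hlo : c % 2 ^ k < 2 ^ k := Nat.mod_lt _ hpow
    by_cases hb : c < 2 ^ k
    · exact ih (by omega) c hb
    · have hdm := Nat.div_add_mod c (2 ^ k)
      have hd1 : c / 2 ^ k = 1 := Nat.div_eq_of_lt_le (by omega) (by omega)
      rw [hd1, Nat.mul_one] at hdm
      have hor : c = c % 2 ^ k ||| 2 ^ k := by rw [lor_two_pow_of_lt _ _ hlo]; omega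
      rw [hor, p1n_lor, spread16_lor, ih (by omega) _ hlo, single_bit_agree k (by omega)]

theorem p1n_eq_spread16 (c : Nat) (hc : c < 65536) : p1n c = spread16 c := by
  have h : (65536 : Nat) = 2 ^ 16 := by norm_num
  exact agree 16 (le_refl _) c (h ▸ hc)

-- ---- Int → Nat reduction ----

theorem natCast_shl (m k : Nat) : ((m : Int) <<< k) = ((m <<< k : Nat) : Int) := by
  simp [Int.shiftLeft_eq]

theorem band_65535 (a : Int) : PySem.Int.band a 65535 = a % 65536 := by
  unfold PySem.Int.band
  have h1 := Nat.and_two_pow_sub_one_eq_mod a.toNat 16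
  have h2 := Nat.and_two_pow_sub_one_eq_mod (-a - 1).toNat 16
  have e1 : (2 : Nat) ^ 16 - 1 = 65535 := by norm_num
  have e2 : (2 : Nat) ^ 16 = 65536 := by norm_num
  rw [e1, e2] at h1 h2
  have h65 : ((65535 : Int)).toNat = 65535 := rfl
  split
  · split
    · rw [h65, h1]; omega
    · omega
  · split
    · rw [h65, Nat.and_comm, h2]; omega
    · omega

-- the i-th 16-bit chunk of x, as a Nat
def cseq (x : Int) (i : Nat) : Nat := ((x >>> (16 * i)) % 65536).toNat

theorem cseq_lt (x : Int) (i : Nat) : cseq x i < 65536 := by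
  unfold cseq
  have := Int.emod_nonneg (x >>> (16 * i)) (b := 65536) (by norm_num)
  have := Int.emod_lt_of_pos (x >>> (16 * i)) (b := 65536) (by norm_num)
  omega

theorem band_chunk (x : Int) (i : Nat) :
    PySem.Int.band (x >>> (16 * i)) 65535 = ((cseq x i : Nat) : Int) := by
  rw [band_65535]
  unfold cseq
  have := Int.emod_nonneg (x >>> (16 * i)) (b := 65536) (by norm_num)
  omega

theorem part1by1_cast (c : Nat) : part1by1 ((c : Nat) : Int) = ((p1n c : Nat) : Int) := by
  unfold part1by1 p1n
  rw [show (65535 : Int) = ((65535 : Nat) : Int) from rfl,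
    show (16711935 : Int) = ((16711935 : Nat) : Int) from rfl,
    show (252645135 : Int) = ((252645135 : Nat) : Int) from rfl,
    show (858993459 : Int) = ((858993459 : Nat) : Int) from rfl,
    show (1431655765 : Int) = ((1431655765 : Nat) : Int) from rfl]
  simp only [natCast_shl, PySem.Int.band_natCast, PySem.Int.bor_natCast]

-- bit bridge: bit j (j < 16) of an Int b is bit j of its low 16-bit chunk
theorem bit_bridge (b : Int) (j : Nat) (hj : j < 16) :
    PySem.Int.band (b >>> j) 1 = ((((b % 65536).toNat >>> j) &&& 1 : Nat) : Int) := by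
  rw [PySem.Int.band_one, PySem.Int.mod_eq_emod_of_pos (by norm_num),
    Int.shiftRight_eq_div_pow]
  have h0 := Int.emod_nonneg b (b := 65536) (by norm_num)
  rw [Nat.shiftRight_eq_div_pow, Nat.and_one_is_mod]
  have hcast : (((b % 65536).toNat / 2 ^ j % 2 : Nat) : Int)
      = (b % 65536) / ((2 ^ j : Nat) : Int) % 2 := by
    push_cast
    rw [Int.toNat_of_nonneg h0]
  rw [hcast]
  interval_cases j <;> norm_num <;> omega

-- ---- the abstract Nat-level main equality ----

theorem natMain (u v bx by' : Nat → Nat)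
    (hu : ∀ q, u q < 65536) (hv : ∀ q, v q < 65536)
    (hbx : ∀ q j, j < 16 → bx (16 * q + j) = (u q >>> j) &&& 1)
    (hby : ∀ q j, j < 16 → by' (16 * q + j) = (v q >>> j) &&& 1) :
    ∀ it, bigOr ((List.range (16 * it)).map
        (fun i => (bx i <<< (2 * i)) ||| (by' i <<< (2 * i + 1))))
      = bigOr ((List.range it).map
        (fun q => (p1n (u q) ||| p1n (v q) <<< 1) <<< (32 * q))) := by
  intro it
  induction it with
  | zero => rfl
  | succ it ih =>
    rw [show 16 * (it + 1) = 16 * it + 16 from by ring, List.range_add,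
      List.map_append, bigOr_append, ih, List.map_map]
    conv_rhs => rw [List.range_succ, List.map_append, bigOr_append]
    congr 1
    have hmap : (List.range 16).map
        ((fun i => (bx i <<< (2 * i)) ||| (by' i <<< (2 * i + 1))) ∘ (fun j => 16 * it + j))
        = (List.range 16).map
          (fun j => (sprTerm (u it) j ||| sprTerm (v it) j <<< 1) <<< (32 * it)) := by
      apply List.map_congr_left
      intro j hj
      have hj16 : j < 16 := List.mem_range.mp hj
      simp only [Function.comp, sprTerm, hbx it j hj16, hby it j hj16]
      rw [show 2 * (16 * it + j) + 1 = (2 * j + 1) + 32 * it from by ring,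
        show 2 * (16 * it + j) = 2 * j + 32 * it from by ring,
        Nat.shiftLeft_add ((u it >>> j) &&& 1) (2 * j) (32 * it),
        Nat.shiftLeft_add ((v it >>> j) &&& 1) (2 * j + 1) (32 * it),
        ← Nat.shiftLeft_or_distrib,
        Nat.shiftLeft_add ((v it >>> j) &&& 1) (2 * j) 1]
    rw [hmap, bigOr_map_shl, bigOr_map_or, bigOr_map_shl]
    rw [show bigOr ((List.range 16).map fun j => sprTerm (u it) j) = spread16 (u it) from rfl,
      show bigOr ((List.range 16).map fun j => sprTerm (v it) j) = spread16 (v it) from rfl,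
      ← p1n_eq_spread16 _ (hu it), ← p1n_eq_spread16 _ (hv it)]
    simp [bigOr]

-- ---- fold characterisations of the two ports ----

theorem foldA (x y : Int) : ∀ it,
    (List.range it).foldl stepA (0, x, y)
      = (((bigOr ((List.range it).map
            (fun q => (p1n (cseq x q) ||| p1n (cseq y q) <<< 1) <<< (32 * q))) : Nat) : Int),
         x >>> (16 * it), y >>> (16 * it)) := by
  intro it
  induction it with
  | zero => simp [bigOr]
  | succ it ih =>
    rw [List.range_succ, List.foldl_append, ih]
    simp only [List.foldl_cons, List.foldl_nil, stepA, Prod.mk.injEq]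
    refine ⟨?_, ?_, ?_⟩
    · rw [band_chunk x it, band_chunk y it, part1by1_cast, part1by1_cast,
        natCast_shl, PySem.Int.bor_natCast, natCast_shl, PySem.Int.bor_natCast,
        List.map_append, bigOr_append]
      simp [bigOr]
    · rw [← Int.shiftRight_add, Nat.mul_succ]
    · rw [← Int.shiftRight_add, Nat.mul_succ]

theorem foldA' (x y : Int) (it : Nat) :
    ((List.range it).foldl stepA (0, x, y)).1
      = ((bigOr ((List.range it).map
          (fun q => (p1n (cseq x q) ||| p1n (cseq y q) <<< 1) <<< (32 * q))) : Nat) : Int) := by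
  rw [foldA]

-- the i-th interleave bit of x, as a Nat
def bitOf (x : Int) (i : Nat) : Nat := (PySem.Int.band (x >>> i) 1).toNat

theorem band_bit_nonneg (x : Int) (i : Nat) : 0 ≤ PySem.Int.band (x >>> i) 1 := by
  rw [PySem.Int.band_comm]
  exact PySem.Int.band_nonneg_of_nonneg_left _ (by norm_num)

theorem foldB (x y : Int) : ∀ M,
    (List.range M).foldl (stepB x y) 0
      = (((bigOr ((List.range M).map
          (fun i => (bitOf x i <<< (2 * i)) ||| (bitOf y i <<< (2 * i + 1))))) : Nat) : Int) := by
  intro M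
  induction M with
  | zero => simp [bigOr]
  | succ M ih =>
    rw [List.range_succ, List.foldl_append, ih]
    simp only [List.foldl_cons, List.foldl_nil, stepB]
    have hx : PySem.Int.band (x >>> M) 1 = ((bitOf x M : Nat) : Int) := by
      unfold bitOf
      have := band_bit_nonneg x M
      omega
    have hy : PySem.Int.band (y >>> M) 1 = ((bitOf y M : Nat) : Int) := by
      unfold bitOf
      have := band_bit_nonneg y M
      omega
    rw [hx, hy, natCast_shl, natCast_shl, PySem.Int.bor_natCast, PySem.Int.bor_natCast,
      List.map_append, bigOr_append]
    simp [bigOr, Nat.or_assoc]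

-- bitOf at a chunked index reads the chunk
theorem bitOf_chunk (x : Int) (q j : Nat) (hj : j < 16) :
    bitOf x (16 * q + j) = (cseq x q >>> j) &&& 1 := by
  unfold bitOf cseq
  rw [Int.shiftRight_add, bit_bridge (x >>> (16 * q)) j hj]
  omega

-- ===== VERDICT (by name: the statement is the Claim_ definition above) =====
theorem interleave2_spec : Claim_equal_interleave2 := by
  intro x y _
  show interleave2 x y = interleave2_alt x y
  simp only [interleave2, interleave2_alt]
  rw [foldA', foldB]
  exact congrArg _ (natMain (cseq x) (cseq y) (bitOf x) (bitOf y)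
    (cseq_lt x) (cseq_lt y) (bitOf_chunk x) (bitOf_chunk y)
    ((max (PySem.Int.bitLength x) (PySem.Int.bitLength y) + 15) / 16)).symm
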